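-- pv_equiv track=rewrite | github.com/adityavkk/Sandbox | problems/LeetCode/554-brick-wall.py | frequencyMax
-- ===== SOURCE A (Python) =====
-- def frequencyMax(xxs):
--     count = {}
--     maximum = 0
--     for xs in xxs:
--         for x in xs:
--             count[x] = count.get(x, 0) + 1
--             maximum = max(count[x], maximum)
--     return maximum
-- ===== SOURCE B (Python) =====
-- def frequencyMax(xxs):
--     flat = sorted(x for xs in xxs for x in xs)
--     best = 0
--     run = 0
--     prev = None
--     for x in flat:
--         run = run + 1 if x == prev else 1
--         best = max(best, run)
--         prev = x
--     return best
-- ===== Notes on version B (the rewrite author's own statement) =====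
-- stated objective: alternative
-- what changed: A builds a hash-map of frequencies while tracking a running maximum; B uses no dictionary at all: it sorts the flattened elements so equal values become contiguous and returns the length of the longest run found by a single linear scan.
import Mathlib
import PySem

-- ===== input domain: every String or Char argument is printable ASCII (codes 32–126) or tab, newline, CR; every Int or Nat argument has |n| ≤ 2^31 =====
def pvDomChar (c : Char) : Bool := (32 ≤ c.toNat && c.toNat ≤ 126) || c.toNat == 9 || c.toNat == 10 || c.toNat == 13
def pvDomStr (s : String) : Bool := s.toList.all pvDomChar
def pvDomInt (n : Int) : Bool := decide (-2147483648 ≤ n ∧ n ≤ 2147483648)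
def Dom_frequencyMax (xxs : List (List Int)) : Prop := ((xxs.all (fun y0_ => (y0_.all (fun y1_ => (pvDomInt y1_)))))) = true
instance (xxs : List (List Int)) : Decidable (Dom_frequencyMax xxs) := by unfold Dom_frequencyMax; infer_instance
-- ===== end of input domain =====

-- B replaces A's dict-with-running-max by sort-then-longest-run: equal values become contiguous after sorting, so the max frequency is the longest run; objective: alternative algorithm, no hash map.

-- ===== PORT A =====
-- nested loops over xxs, one dict + running maximum, step for step as in the Python
def frequencyMax (xxs : List (List Int)) : Int :=
  (xxs.foldl
    (fun s xs => xs.foldl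
      (fun (s : PySem.Dict Int Int × Int) x =>
        (s.1.insert x (s.1.getD x 0 + 1),
         max ((s.1.insert x (s.1.getD x 0 + 1)).getD x 0) s.2))
      s)
    ((PySem.Dict.empty : PySem.Dict Int Int), 0)).2

-- ===== PORT B =====
-- flatten and sort, then one scan keeping (best, run, prev) — Source B step for step
def frequencyMax_alt (xxs : List (List Int)) : Int :=
  let flat := PySem.List.sorted (xxs.flatMap (fun xs => xs)) (fun x => x) false
  (flat.foldl
    (fun (s : Int × Int × Option Int) x =>
      let run := if some x = s.2.2 then s.2.1 + 1 else 1
      (max s.1 run, run, some x))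
    (0, 0, none)).1

-- ===== PRECONDITION & SPEC =====
def Spec_frequencyMax (xxs : List (List Int)) (out : Int) : Prop := out = frequencyMax_alt xxs
instance (xxs : List (List Int)) (out : Int) : Decidable (Spec_frequencyMax xxs out) := by unfold Spec_frequencyMax; infer_instance

-- ===== CLAIM (what is proved, stated in full; the proofs are below) =====
def Claim_equal_frequencyMax : Prop := ∀ (xxs : List (List Int)), Dom_frequencyMax xxs → Spec_frequencyMax xxs (frequencyMax xxs)

-- ===== LEMMAS AND PROOFS =====

-- "m is the maximum multiplicity of any element of l (0 for the empty list)"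
def IsMaxCount (l : List Int) (m : Int) : Prop :=
  0 ≤ m ∧ (∀ x : Int, (l.count x : Int) ≤ m) ∧ (m = 0 ∨ ∃ x : Int, (l.count x : Int) = m)

theorem isMaxCount_unique (l : List Int) (m m' : Int)
    (h : IsMaxCount l m) (h' : IsMaxCount l m') : m = m' := by
  obtain ⟨h0, hub, hw⟩ := h
  obtain ⟨h0', hub', hw'⟩ := h'
  apply le_antisymm
  · rcases hw with rfl | ⟨x, he⟩
    · exact h0'
    · exact he ▸ hub' x
  · rcases hw' with rfl | ⟨x, he⟩
    · exact h0
    · exact he ▸ hub x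

theorem maxCount_step (pre : List Int) (x m : Int) (h : IsMaxCount pre m) :
    IsMaxCount (pre ++ [x]) (max ((pre.count x : Int) + 1) m) := by
  obtain ⟨h0, hub, hw⟩ := h
  have hcount : ∀ y : Int, (pre ++ [x]).count y =
      pre.count y + (if y = x then 1 else 0) := by
    intro y
    have hmem : y ≠ x → y ∉ [x] := by
      intro h hm; rw [List.mem_singleton] at hm; exact h hm
    by_cases hy : y = x
    · subst hy; simp [List.count_append]
    · simp [List.count_append, List.count_eq_zero.2 (hmem hy), hy]
  refine ⟨le_trans h0 (le_max_right _ _), ?_, ?_⟩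
  · intro y
    rw [hcount]
    by_cases hy : y = x
    · subst hy
      have : ((pre.count y + if y = y then 1 else 0 : Nat) : Int) = (pre.count y : Int) + 1 := by
        simp
      rw [this]
      exact le_max_left ((pre.count y : Int) + 1) m
    · simp only [if_neg hy]; push_cast
      exact le_trans (by exact_mod_cast hub y) (le_max_right _ _)
  · rcases le_total ((pre.count x : Int) + 1) m with hle | hle
    · rw [max_eq_right hle]
      rcases hw with rfl | ⟨y, he⟩
      · exact Or.inl rfl
      · have hyx : y ≠ x := by
          rintro rfl; omega
        refine Or.inr ⟨y, ?_⟩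
        rw [hcount, if_neg hyx]; push_cast; omega
    · rw [max_eq_left hle]
      refine Or.inr ⟨x, ?_⟩
      rw [hcount, if_pos rfl]; push_cast; ring

-- A's inner body folded over a flat list, starting from (counter pre, m)
theorem loopA (l : List Int) :
    ∀ (pre : List Int) (m : Int), IsMaxCount pre m →
    IsMaxCount (pre ++ l)
      ((l.foldl
        (fun (s : PySem.Dict Int Int × Int) x =>
          (s.1.insert x (s.1.getD x 0 + 1),
           max ((s.1.insert x (s.1.getD x 0 + 1)).getD x 0) s.2))
        (PySem.Dict.counter pre, m)).2) := by
  induction l with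
  | nil => intro pre m h; simpa using h
  | cons x t ih =>
    intro pre m h
    have hd : (PySem.Dict.counter pre).insert x ((PySem.Dict.counter pre).getD x 0 + 1)
        = PySem.Dict.counter (pre ++ [x]) := by
      rw [← PySem.Dict.foldl_insert_getD_add_one_eq_counter,
          ← PySem.Dict.foldl_insert_getD_add_one_eq_counter, List.foldl_append]
      rfl
    have hg : ((PySem.Dict.counter pre).insert x ((PySem.Dict.counter pre).getD x 0 + 1)).getD x 0
        = (pre.count x : Int) + 1 := by
      rw [hd, PySem.Dict.getD_counter]
      rw [List.count_append]
      push_cast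
      simp
    have hstep := maxCount_step pre x m h
    have := ih (pre ++ [x]) (max ((pre.count x : Int) + 1) m) hstep
    rw [List.foldl_cons, hg, hd]
    simpa [List.append_assoc] using this

-- B's scan folded over the remaining sorted suffix
theorem loopB (l : List Int) :
    ∀ (pre : List Int) (best run : Int) (prev : Option Int),
    List.Pairwise (· ≤ ·) (pre ++ l) →
    ((pre = [] ∧ prev = none) ∨
      (∃ p, prev = some p ∧ p ∈ pre ∧ (∀ y ∈ pre, y ≤ p) ∧ run = (pre.count p : Int))) →
    IsMaxCount pre best →
    IsMaxCount (pre ++ l)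
      ((l.foldl
        (fun (s : Int × Int × Option Int) x =>
          let run := if some x = s.2.2 then s.2.1 + 1 else 1
          (max s.1 run, run, some x))
        (best, run, prev)).1) := by
  induction l with
  | nil => intro pre best run prev _ _ hb; simpa using hb
  | cons x t ih =>
    intro pre best run prev hpw hinv hb
    have hub : ∀ y ∈ pre, y ≤ x := by
      intro y hy
      exact (List.pairwise_append.1 hpw).2.2 y hy x List.mem_cons_self
    have hrun : (if some x = prev then run + 1 else 1) = (pre.count x : Int) + 1 := by
      rcases hinv with ⟨hpre, hprev⟩ | ⟨p, hprev, hp, hpub, hr⟩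
      · subst hpre hprev; simp
      · subst hprev
        by_cases hx : x = p
        · subst hx; simp [hr]
        · have hnx : x ∉ pre := by
            intro hmem
            exact hx (le_antisymm (hpub x hmem) ((List.pairwise_append.1 hpw).2.2 p hp x List.mem_cons_self))
          have h0 : ((pre.count x : Nat) : Int) = 0 := by
            simp [List.count_eq_zero.2 hnx]
          rw [if_neg (by simpa using hx), h0]
          ring
    have hbest : IsMaxCount (pre ++ [x]) (max best (if some x = prev then run + 1 else 1)) := by
      rw [hrun, max_comm]
      exact maxCount_step pre x best hb
    have hpw' : List.Pairwise (· ≤ ·) ((pre ++ [x]) ++ t) := by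
      rwa [List.append_assoc, List.singleton_append]
    have hinv' : ((pre ++ [x]) = [] ∧ (some x : Option Int) = none) ∨
        (∃ p, (some x : Option Int) = some p ∧ p ∈ pre ++ [x] ∧
          (∀ y ∈ pre ++ [x], y ≤ p) ∧
          (if some x = prev then run + 1 else 1) = ((pre ++ [x]).count p : Int)) := by
      refine Or.inr ⟨x, rfl, by simp, ?_, ?_⟩
      · intro y hy
        rcases List.mem_append.1 hy with hy | hy
        · exact hub y hy
        · simp at hy; omega
      · rw [hrun, List.count_append]; push_cast; simp
    have := ih (pre ++ [x]) _ _ (some x) hpw' hinv' hbest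
    simpa [List.foldl_cons, List.append_assoc] using this

theorem isMaxCount_perm (l l' : List Int) (m : Int) (hp : l.Perm l')
    (h : IsMaxCount l m) : IsMaxCount l' m := by
  obtain ⟨h0, hub, hw⟩ := h
  refine ⟨h0, fun x => (hp.count_eq x) ▸ hub x, ?_⟩
  rcases hw with rfl | ⟨x, he⟩
  · exact Or.inl rfl
  · exact Or.inr ⟨x, (hp.count_eq x) ▸ he⟩

-- ===== VERDICT (by name: the statement is the Claim_ definition above) =====
theorem frequencyMax_spec : Claim_equal_frequencyMax := by
  intro xxs _
  unfold Spec_frequencyMax frequencyMax frequencyMax_alt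
  rw [← List.foldl_flatten]
  have hflat : xxs.flatMap (fun xs => xs) = xxs.flatten := by simp
  rw [hflat]
  have hA := loopA xxs.flatten [] 0 ⟨le_refl 0, by simp, Or.inl rfl⟩
  have hpw := PySem.List.sorted_pairwise (xs := xxs.flatten) (key := fun x => x)
  have hB := loopB (PySem.List.sorted xxs.flatten (fun x => x) false) [] 0 0 none
    (by simpa using hpw) (Or.inl ⟨rfl, rfl⟩) ⟨le_refl 0, by simp, Or.inl rfl⟩
  have hperm : (PySem.List.sorted xxs.flatten (fun x => x) false).Perm xxs.flatten :=
    PySem.List.sorted_perm _ _ _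
  have hB' := isMaxCount_perm _ _ _ hperm (by simpa using hB)
  have hA' : IsMaxCount xxs.flatten
      ((xxs.flatten.foldl
        (fun (s : PySem.Dict Int Int × Int) x =>
          (s.1.insert x (s.1.getD x 0 + 1),
           max ((s.1.insert x (s.1.getD x 0 + 1)).getD x 0) s.2))
        (PySem.Dict.empty, 0)).2) := by
    simpa using hA
  exact isMaxCount_unique _ _ _ hA' hB'
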